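-- pv_equiv track=rewrite | github.com/LiaaQ/krita-fourier-transform | plugin/FT3D.py | shift_dft_2d
-- ===== SOURCE A (Python) =====
-- def shift_dft_2d(data):
--     """
--     Shift the zero-frequency component to the center of the image.
--     """
--     height = len(data)
--     width = len(data[0])
--     half_height = height // 2
--     half_width = width // 2
--
--     # Swap quadrants
--     shifted = [[0 for _ in range(width)] for _ in range(height)]
--     for y in range(height):
--         for x in range(width):
--             new_y = (y + half_height) % height
--             new_x = (x + half_width) % width
--             shifted[new_y][new_x] = data[y][x]
--
--     return shifted
-- ===== SOURCE B (Python) =====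
-- def shift_dft_2d(data):
--     """
--     Shift the zero-frequency component to the center of the image.
--     """
--     height = len(data)
--     width = len(data[0])
--     split_h = height - height // 2
--     split_w = width - width // 2
--     rolled = data[split_h:] + data[:split_h]
--     return [row[split_w:width] + row[:split_w] for row in rolled]
-- ===== Notes on version B (the rewrite author's own statement) =====
-- stated objective: simpler
-- what changed: Replaced the per-element double loop that writes each data[y][x] into a preallocated matrix at modular target indices with a quadrant roll built from whole-list slices: roll the rows by height-height//2, then roll each row by width-width//2.
import Mathlib
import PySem

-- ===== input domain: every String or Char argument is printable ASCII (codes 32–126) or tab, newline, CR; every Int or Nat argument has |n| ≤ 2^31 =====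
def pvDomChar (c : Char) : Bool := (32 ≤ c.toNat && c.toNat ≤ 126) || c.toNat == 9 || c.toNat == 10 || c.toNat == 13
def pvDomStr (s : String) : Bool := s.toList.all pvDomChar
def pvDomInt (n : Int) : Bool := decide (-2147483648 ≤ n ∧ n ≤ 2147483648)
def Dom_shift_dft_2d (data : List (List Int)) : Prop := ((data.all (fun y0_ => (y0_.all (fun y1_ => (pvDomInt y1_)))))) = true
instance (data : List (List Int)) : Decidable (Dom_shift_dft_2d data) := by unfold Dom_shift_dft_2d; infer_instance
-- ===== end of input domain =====

-- B replaces A's per-element modular double loop (writing into a preallocated matrix)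
-- by a quadrant roll built from whole slices of rows and columns (objective: simpler).

-- ===== PORT A =====
-- data[y][x] for in-range nonnegative indices (exact on Pre_, where all accesses are in range)
def pvGet2 (data : List (List Int)) (y x : Nat) : Int := (data.getD y []).getD x 0

def shift_dft_2d (data : List (List Int)) : List (List Int) :=
  let height := data.length
  let width := (data.getD 0 []).length
  let half_height := height / 2
  let half_width := width / 2
  let shifted := List.replicate height (List.replicate width (0 : Int))
  (List.range height).foldl (fun M y =>
    (List.range width).foldl (fun M x =>
      let new_y := (y + half_height) % height
      let new_x := (x + half_width) % width
      M.set new_y ((M.getD new_y []).set new_x (pvGet2 data y x))) M) shifted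

-- ===== PORT B =====
def shift_dft_2d_alt (data : List (List Int)) : List (List Int) :=
  let height := data.length
  let width := (data.getD 0 []).length
  let split_h := height - height / 2
  let split_w := width - width / 2
  let rolled := data.drop split_h ++ data.take split_h
  rolled.map (fun row => ((row.take width).drop split_w) ++ row.take split_w)

-- ===== PRECONDITION & SPEC =====
-- Pre_ excludes exactly the inputs where A raises IndexError: empty data (data[0]) and
-- data with some row shorter than the first row (data[y][x] for x < len(data[0])).
def Pre_shift_dft_2d (data : List (List Int)) : Prop :=
  data ≠ [] ∧ ∀ row ∈ data, (data.getD 0 []).length ≤ row.length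
instance (data : List (List Int)) : Decidable (Pre_shift_dft_2d data) := by
  unfold Pre_shift_dft_2d; infer_instance

def pvWitness_shift_dft_2d : List (List Int) := [[1, 2], [3, 4]]

def Spec_shift_dft_2d (data : List (List Int)) (out : List (List Int)) : Prop := out = shift_dft_2d_alt data
instance (data : List (List Int)) (out : List (List Int)) : Decidable (Spec_shift_dft_2d data out) := by unfold Spec_shift_dft_2d; infer_instance

-- ===== CLAIM (what is proved, stated in full; the proofs are below) =====
def Claim_equal_shift_dft_2d : Prop := ∀ (data : List (List Int)), Dom_shift_dft_2d data → Pre_shift_dft_2d data → Spec_shift_dft_2d data (shift_dft_2d data)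

-- ===== LEMMAS AND PROOFS =====

-- a fold of pure `set`s preserves the length
theorem pv_foldl_set_length {α : Type} (f : Nat → Nat) (g : Nat → α) :
    ∀ (xs : List Nat) (r0 : List α),
      (xs.foldl (fun r x => r.set (f x) (g x)) r0).length = r0.length := by
  intro xs
  induction xs with
  | nil => intro r0; rfl
  | cons x xs ih => intro r0; simp [List.foldl_cons, ih]

-- the inner loop only touches row `ny`: it can be pulled out as one row update
theorem pv_foldl_row_extract {α : Type} (ny : Nat) (f : Nat → Nat) (g : Nat → α) :
    ∀ (xs : List Nat) (M : List (List α)), ny < M.length →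
      xs.foldl (fun M x => M.set ny ((M.getD ny []).set (f x) (g x))) M
        = M.set ny (xs.foldl (fun r x => r.set (f x) (g x)) (M.getD ny [])) := by
  intro xs
  induction xs with
  | nil =>
      intro M hM
      simp [List.getD, List.getElem?_eq_getElem hM, List.set_getElem_self]
  | cons x xs ih =>
      intro M hM
      rw [List.foldl_cons, ih _ (by simpa using hM), List.foldl_cons]
      have hget : ((M.set ny ((M.getD ny []).set (f x) (g x))).getD ny []) =
          (M.getD ny []).set (f x) (g x) := by
        simp [List.getD]
        rw [List.getElem?_set_self']
        simp [hM]
      rw [hget, List.set_set]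

-- a fold of pure writes `set x (v x)`: position j holds v j if some write hit it
theorem pv_foldl_set_getElem? {α : Type} (v : Nat → α) :
    ∀ (xs : List Nat) (r0 : List α) (j : Nat), j < r0.length →
      (xs.foldl (fun r x => r.set x (v x)) r0)[j]?
        = some (if j ∈ xs then v j else r0.getD j (v j)) := by
  intro xs
  induction xs with
  | nil =>
      intro r0 j hj
      simp [List.getD, List.getElem?_eq_getElem hj]
  | cons x xs ih =>
      intro r0 j hj
      rw [List.foldl_cons, ih _ j (by simpa using hj)]
      by_cases hjx : j = x
      · subst hjx
        by_cases hmem : j ∈ xs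
        · simp [hmem]
        · simp [hmem, List.getD]
          rw [List.getElem?_set_self']
          simp [hj]
      · by_cases hmem : j ∈ xs
        · simp [hmem]
        · simp [hmem, hjx, List.getD, List.getElem?_set_ne (by omega : x ≠ j)]

-- arithmetic of the modular shift: ((j + (n - s)) % n + s) % n = j for j < n, s ≤ n
theorem pv_mod_shift_cancel (n s j : Nat) (hs : s ≤ n) (hj : j < n) :
    ((j + (n - s)) % n + s) % n = j := by
  rw [Nat.mod_add_mod]
  have : j + (n - s) + s = j + n := by omega
  rw [this, Nat.add_mod_right, Nat.mod_eq_of_lt hj]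

theorem pv_mod_shift_cancel' (n s x : Nat) (hs : s ≤ n) (hx : x < n) :
    ((x + s) % n + (n - s)) % n = x := by
  rw [Nat.mod_add_mod]
  have : x + s + (n - s) = x + n := by omega
  rw [this, Nat.add_mod_right, Nat.mod_eq_of_lt hx]

-- the core fold: writing V y to slot (y + s) % n, over y < n, yields the rolled list
theorem pv_foldl_set_mod {α : Type} (n s : Nat) (hs : s ≤ n) (V : Nat → α)
    (M0 : List α) (hM : M0.length = n) :
    (List.range n).foldl (fun M y => M.set ((y + s) % n) (V y)) M0
      = (List.range n).map (fun i => V ((i + (n - s)) % n)) := by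
  set v : Nat → α := fun j => V ((j + (n - s)) % n) with hv
  have hcong : (List.range n).foldl (fun M y => M.set ((y + s) % n) (V y)) M0
      = (List.range n).foldl (fun M y => M.set ((y + s) % n) (v ((y + s) % n))) M0 := by
    apply List.foldl_ext
    intro M y hy
    have hy' : y < n := List.mem_range.mp hy
    show M.set ((y + s) % n) (V y) = M.set ((y + s) % n) (V (((y + s) % n + (n - s)) % n))
    rw [pv_mod_shift_cancel' n s y hs hy']
  rw [hcong]
  have hmap : (List.range n).foldl (fun M y => M.set ((y + s) % n) (v ((y + s) % n))) M0
      = ((List.range n).map (fun y => (y + s) % n)).foldl (fun M j => M.set j (v j)) M0 := by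
    rw [List.foldl_map]
  rw [hmap]
  apply List.ext_getElem?
  intro j
  by_cases hj : j < n
  · have hjM : j < M0.length := by omega
    rw [pv_foldl_set_getElem? v _ M0 j hjM]
    have hmem : j ∈ (List.range n).map (fun y => (y + s) % n) := by
      refine List.mem_map.mpr ⟨(j + (n - s)) % n, List.mem_range.mpr (Nat.mod_lt _ (by omega)), ?_⟩
      exact pv_mod_shift_cancel n s j hs hj
    rw [if_pos hmem]
    rw [List.getElem?_map, List.getElem?_range hj]
    rfl
  · have h1 : (((List.range n).map (fun y => (y + s) % n)).foldl (fun M j => M.set j (v j)) M0).length = n := by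
      have := pv_foldl_set_length (fun j => j) v ((List.range n).map (fun y => (y + s) % n)) M0
      simpa [hM] using this
    rw [List.getElem?_eq_none (by rw [h1]; omega),
        List.getElem?_eq_none (by simp; omega)]

-- getElem of a rolled list
theorem pv_getElem_roll {α : Type} (l : List α) (s i : Nat) (hs : s ≤ l.length)
    (hi : i < l.length) :
    (l.drop s ++ l.take s)[i]? = l[(i + s) % l.length]? := by
  by_cases h : i < l.length - s
  · rw [List.getElem?_append_left (by simp; omega)]
    rw [List.getElem?_drop]
    congr 1
    rw [Nat.mod_eq_of_lt (by omega)]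
    omega
  · rw [List.getElem?_append_right (by simp; omega)]
    rw [List.getElem?_take]
    have hlt : i - (l.drop s).length < s := by simp; omega
    rw [if_pos hlt]
    congr 1
    simp only [List.length_drop] at hlt ⊢
    have h2 : (i + s) % l.length = i + s - l.length := by
      rw [Nat.mod_eq_sub_mod (by omega), Nat.mod_eq_of_lt (by omega)]
    omega

-- target row y of the shifted matrix, as a closed form
def pvRowV (data : List (List Int)) (w y : Nat) : List Int :=
  (List.range w).map (fun j => pvGet2 data y ((j + (w - w / 2)) % w))

-- the inner row fold computes pvRowV, independently of the initial row's contents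
theorem pv_row_eq (g : Nat → Int) (w : Nat) (r0 : List Int) (hr : r0.length = w) :
    (List.range w).foldl (fun r x => r.set ((x + w / 2) % w) (g x)) r0
      = (List.range w).map (fun j => g ((j + (w - w / 2)) % w)) :=
  pv_foldl_set_mod w (w / 2) (Nat.div_le_self w 2) g r0 hr

-- the outer fold with the inner loop simplified to a whole-row write
theorem pv_outer_eq (data : List (List Int)) (h w : Nat) (hh : 0 < h) :
    ∀ (ys : List Nat) (M : List (List Int)), M.length = h → (∀ row ∈ M, row.length = w) →
      ys.foldl (fun M y =>
          (List.range w).foldl (fun M x =>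
            M.set ((y + h / 2) % h)
              ((M.getD ((y + h / 2) % h) []).set ((x + w / 2) % w) (pvGet2 data y x))) M) M
        = ys.foldl (fun M y => M.set ((y + h / 2) % h) (pvRowV data w y)) M := by
  intro ys
  induction ys with
  | nil => intro M _ _; rfl
  | cons y ys ih =>
      intro M hM hrows
      have hny : (y + h / 2) % h < M.length := by rw [hM]; exact Nat.mod_lt _ hh
      rw [List.foldl_cons, List.foldl_cons,
          pv_foldl_row_extract ((y + h / 2) % h) (fun x => (x + w / 2) % w)
            (fun x => pvGet2 data y x) (List.range w) M hny]
      have hrow : (M.getD ((y + h / 2) % h) []).length = w := by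
        have : M.getD ((y + h / 2) % h) [] ∈ M := by
          rw [List.getD, List.getElem?_eq_getElem hny]
          exact List.getElem_mem hny
        exact hrows _ this
      rw [pv_row_eq (fun x => pvGet2 data y x) w _ hrow]
      apply ih
      · simp [hM]
      · intro row hr
        rcases List.mem_or_eq_of_mem_set hr with h1 | h1
        · exact hrows _ h1
        · subst h1; simp

-- the rolled-row slices of B compute pvRowV's shape pointwise
theorem pv_rowT_eq (row : List Int) (w : Nat) (hw : w ≤ row.length) :
    (row.take w).drop (w - w / 2) ++ row.take (w - w / 2)
      = (List.range w).map (fun j => row.getD ((j + (w - w / 2)) % w) 0) := by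
  rcases Nat.eq_zero_or_pos w with hw0 | hw0
  · subst hw0; simp
  · have htt : row.take (w - w / 2) = (row.take w).take (w - w / 2) := by
      rw [List.take_take]
      congr 1
      omega
    rw [htt]
    have hrl : (row.take w).length = w := by simp; omega
    apply List.ext_getElem?
    intro j
    by_cases hj : j < w
    · rw [pv_getElem_roll (row.take w) (w - w / 2) j (by omega) (by omega)]
      simp only [hrl]
      have hx : (j + (w - w / 2)) % w < w := Nat.mod_lt _ hw0
      rw [List.getElem?_eq_getElem (by omega), List.getElem?_map, List.getElem?_range hj]
      congr 1
      rw [List.getElem_take]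
      simp only []
      rw [List.getD_eq_getElem row 0 (by omega)]
    · rw [List.getElem?_eq_none (by simp [hrl]; omega),
          List.getElem?_eq_none (by simp; omega)]

-- ===== VERDICT (by name: the statement is the Claim_ definition above) =====
theorem shift_dft_2d_spec : Claim_equal_shift_dft_2d := by
  intro data _ hpre
  obtain ⟨hne, hrows⟩ := hpre
  unfold Spec_shift_dft_2d
  set h := data.length with hhdef
  set w := (data.getD 0 []).length with hwdef
  have hh : 0 < h := by
    rw [hhdef]; exact List.length_pos_iff.mpr hne
  -- A in closed form
  have hA : shift_dft_2d data
      = (List.range h).map (fun i => pvRowV data w ((i + (h - h / 2)) % h)) := by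
    show (List.range h).foldl (fun M y =>
        (List.range w).foldl (fun M x =>
          M.set ((y + h / 2) % h)
            ((M.getD ((y + h / 2) % h) []).set ((x + w / 2) % w) (pvGet2 data y x))) M)
        (List.replicate h (List.replicate w (0 : Int)))
      = (List.range h).map (fun i => pvRowV data w ((i + (h - h / 2)) % h))
    rw [pv_outer_eq data h w hh (List.range h) _ (by simp)
        (by intro row hr; simp_all [List.eq_of_mem_replicate hr])]
    exact pv_foldl_set_mod h (h / 2) (Nat.div_le_self h 2) (pvRowV data w) _ (by simp)
  rw [hA]
  -- B in closed form, then compare pointwise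
  show (List.range h).map (fun i => pvRowV data w ((i + (h - h / 2)) % h))
      = (data.drop (h - h / 2) ++ data.take (h - h / 2)).map
          (fun row => (row.take w).drop (w - w / 2) ++ row.take (w - w / 2))
  apply List.ext_getElem?
  intro i
  by_cases hi : i < h
  · rw [List.getElem?_map, List.getElem?_range hi, List.getElem?_map,
        pv_getElem_roll data (h - h / 2) i (by omega) (by omega)]
    have hy' : (i + (h - h / 2)) % data.length < data.length := Nat.mod_lt _ hh
    rw [List.getElem?_eq_getElem hy']
    simp only [Option.map_some]
    congr 1
    set y' := (i + (h - h / 2)) % data.length with hy'def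
    have hmem : data[y'] ∈ data := List.getElem_mem hy'
    rw [pv_rowT_eq data[y'] w (hrows _ hmem)]
    unfold pvRowV pvGet2
    apply List.map_congr_left
    intro j hj
    congr 2
    rw [List.getD, List.getElem?_eq_getElem hy']
    rfl
  · rw [List.getElem?_eq_none (by simp; omega),
        List.getElem?_eq_none (by simp; omega)]
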